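-- pv_equiv track=rewrite | github.com/channymc/coverpack | ranks.py | _looks_like_permission_key
-- ===== SOURCE A (Python) =====
-- DEFAULT_ICON_STATE_KEYS = {
--     "default",
--     "active",
--     "selected",
--     "hover",
--     "normal",
--     "off",
--     "on",
--     "enabled",
--     "disabled",
-- }
--
-- def _normalize_permission_candidate(value: str) -> str:
--     key = value.strip().lower().strip("'\"")
--     if not key:
--         return ""
--
--     while key.startswith(("!", "+", "-")) and len(key) > 1:
--         key = key[1:].strip()
--
--     for wrapper in ("has_permission(", "haspermission(", "permission(", "perm(", "node(", "group("):
--         if key.startswith(wrapper) and key.endswith(")"):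
--             key = key[len(wrapper) : -1].strip().strip("'\"")
--             break
--
--     for prefix in ("permission:", "perm:", "node:", "group:"):
--         if key.startswith(prefix):
--             key = key[len(prefix) :].strip()
--
--     return key
--
-- def _looks_like_permission_key(value: str) -> bool:
--     key = _normalize_permission_candidate(value)
--     if not key:
--         return False
--
--     if "=" in key and not key.startswith("http"):
--         parts = [part.strip() for part in key.split("=") if part.strip()]
--         for part in parts:
--             if _looks_like_permission_key(part):
--                 return True
--
--     if key in DEFAULT_ICON_STATE_KEYS:
--         return False
--     if any(token in key for token in ("/", "\\", ".png", ".tga", "textures", "http://", "https://")):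
--         return False
--     if any(ch in key for ch in (" ", "\t", "{", "}", "[", "]")):
--         return False
--     if "." in key or ":" in key or "*" in key:
--         return True
--     return key.startswith(("perm", "permission", "rank", "group", "lp_", "luckperms"))
-- ===== SOURCE B (Python) =====
-- DEFAULT_ICON_STATE_KEYS = {
--     "default",
--     "active",
--     "selected",
--     "hover",
--     "normal",
--     "off",
--     "on",
--     "enabled",
--     "disabled",
-- }
--
-- def _normalize_permission_candidate(value: str) -> str:
--     key = value.strip().lower().strip("'\"")
--     if not key:
--         return ""
--
--     while key.startswith(("!", "+", "-")) and len(key) > 1: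
--         key = key[1:].strip()
--
--     for wrapper in ("has_permission(", "haspermission(", "permission(", "perm(", "node(", "group("):
--         if key.startswith(wrapper) and key.endswith(")"):
--             key = key[len(wrapper) : -1].strip().strip("'\"")
--             break
--
--     for prefix in ("permission:", "perm:", "node:", "group:"):
--         if key.startswith(prefix):
--             key = key[len(prefix) :].strip()
--
--     return key
--
-- def _classify(key: str) -> bool:
--     """Judge an already-normalized, '='-free key."""
--     if key in DEFAULT_ICON_STATE_KEYS:
--         return False
--     if any(token in key for token in ("/", "\\", ".png", ".tga", "textures", "http://", "https://")):
--         return False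
--     if any(ch in key for ch in (" ", "\t", "{", "}", "[", "]")):
--         return False
--     if "." in key or ":" in key or "*" in key:
--         return True
--     return key.startswith(("perm", "permission", "rank", "group", "lp_", "luckperms"))
--
-- def _looks_like_permission_key(value: str) -> bool:
--     key = _normalize_permission_candidate(value)
--     if not key:
--         return False
--     if "=" in key and not key.startswith("http"):
--         # split parts never contain '=', so one flat pass replaces the recursion
--         for raw in key.split("="):
--             part = raw.strip()
--             if not part:
--                 continue
--             sub = _normalize_permission_candidate(part)
--             if sub and _classify(sub):
--                 return True
--     return _classify(key)
-- ===== Notes on version B (the rewrite author's own statement) =====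
-- stated objective: simpler
-- what changed: B replaces A's self-recursion over the separator-split parts (plus the build-then-filter parts list) by a non-recursive _classify helper and one flat loop, since split parts never contain the separator and so A's recursion is at most one level deep.
import Mathlib
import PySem

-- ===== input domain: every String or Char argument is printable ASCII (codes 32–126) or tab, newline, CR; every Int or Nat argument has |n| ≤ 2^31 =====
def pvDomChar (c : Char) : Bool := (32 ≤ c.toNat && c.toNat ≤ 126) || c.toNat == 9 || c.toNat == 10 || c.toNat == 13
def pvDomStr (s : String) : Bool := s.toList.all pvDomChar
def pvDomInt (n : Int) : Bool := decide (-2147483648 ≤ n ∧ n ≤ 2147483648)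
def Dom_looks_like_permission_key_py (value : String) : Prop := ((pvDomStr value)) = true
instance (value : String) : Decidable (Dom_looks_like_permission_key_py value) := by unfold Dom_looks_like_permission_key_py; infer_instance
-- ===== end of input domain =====

-- B replaces A's self-recursion over '='-split parts by a flat loop with a non-recursive
-- classification helper (the recursion is at most one level deep); same values, different decomposition.

-- ===== shared module constants (the same literals both Pythons read) =====
def pvQuotes : List Char := ['\'', '"']
def pvIconKeys : List (List Char) :=
  ["default", "active", "selected", "hover", "normal", "off", "on", "enabled", "disabled"].map String.toList
def pvWrappers : List (List Char) :=
  ["has_permission(", "haspermission(", "permission(", "perm(", "node(", "group("].map String.toList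
def pvPrefixes : List (List Char) :=
  ["permission:", "perm:", "node:", "group:"].map String.toList

-- sublist facts cited by pvStripSigns' decreasing_by (and reused in the proofs below)
theorem pv_dropdrop {α : Type} (p q : α → Bool) (l : List α) :
    ((List.dropWhile p (List.dropWhile q l).reverse).reverse).Sublist l := by
  have h1 : ((List.dropWhile p (List.dropWhile q l).reverse).reverse).Sublist
      ((List.dropWhile q l).reverse.reverse) := (List.dropWhile_sublist _).reverse
  simp only [List.reverse_reverse] at h1
  exact h1.trans (List.dropWhile_sublist _)

theorem pv_strip_sublist (l : List Char) : (PySem.Chars.strip l).Sublist l := by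
  unfold PySem.Chars.strip PySem.Chars.rstrip PySem.Chars.lstrip
  exact pv_dropdrop _ _ _

-- `while key.startswith(("!", "+", "-")) and len(key) > 1: key = key[1:].strip()`
def pvStripSigns (key : List Char) : List Char :=
  if (PySem.Chars.startswith key ['!'] || PySem.Chars.startswith key ['+'] ||
      PySem.Chars.startswith key ['-']) && decide (1 < key.length) then
    pvStripSigns (PySem.Chars.strip (PySem.List.slice key (some 1) none))
  else key
termination_by key.length
decreasing_by
  rename_i h
  simp only [Bool.and_eq_true, decide_eq_true_eq] at h
  rw [PySem.List.slice_from_one]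
  have h1 := (pv_strip_sublist key.tail).length_le
  have h2 := List.length_tail (l := key)
  omega

-- `for wrapper in (…): if key.startswith(wrapper) and key.endswith(")"): key = key[len(wrapper):-1].strip().strip("'\""); break`
def pvWrapLoop : List (List Char) → List Char → List Char
  | [], key => key
  | w :: ws, key =>
    if PySem.Chars.startswith key w && PySem.Chars.endswith key [')'] then
      PySem.Chars.stripChars
        (PySem.Chars.strip (PySem.List.slice key (some (w.length : Int)) (some (-1)))) pvQuotes
    else pvWrapLoop ws key

-- `for prefix in (…): if key.startswith(prefix): key = key[len(prefix):].strip()`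
def pvPrefLoop : List (List Char) → List Char → List Char
  | [], key => key
  | p :: ps, key =>
    pvPrefLoop ps
      (if PySem.Chars.startswith key p then
        PySem.Chars.strip (PySem.List.slice key (some (p.length : Int)) none)
      else key)

-- _normalize_permission_candidate (shared by both Pythons)
def pvNorm (value : List Char) : List Char :=
  let key := PySem.Chars.stripChars (PySem.Chars.lower (PySem.Chars.strip value)) pvQuotes
  if key = [] then []
  else pvPrefLoop pvPrefixes (pvWrapLoop pvWrappers (pvStripSigns key))

-- ===== PORT A =====
-- _looks_like_permission_key, recursive; the Nat argument is fuel (a totality guard only: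
-- the recursion depth is bounded by the fuel the wrapper supplies).
def pvLooksRec : Nat → List Char → Bool
  | 0, _ => false
  | n + 1, value =>
    let key := pvNorm value
    if key = [] then false
    else
      let hit :=
        if PySem.Chars.isIn ['='] key && !PySem.Chars.startswith key "http".toList then
          (((PySem.Chars.splitOn key ['=']).map PySem.Chars.strip).filter
            (fun p => !p.isEmpty)).any (fun part => pvLooksRec n part)
        else false
      if hit then true
      else if key ∈ pvIconKeys then false
      else if (["/", "\\", ".png", ".tga", "textures", "http://", "https://"].map String.toList).any
          (fun t => PySem.Chars.isIn t key) then false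
      else if ([" ", "\t", "{", "}", "[", "]"].map String.toList).any
          (fun t => PySem.Chars.isIn t key) then false
      else if PySem.Chars.isIn ['.'] key || PySem.Chars.isIn [':'] key ||
          PySem.Chars.isIn ['*'] key then true
      else (["perm", "permission", "rank", "group", "lp_", "luckperms"].map String.toList).any
          (fun p => PySem.Chars.startswith key p)

def looks_like_permission_key_py (value : String) : Bool :=
  pvLooksRec (value.toList.length + 1) value.toList

-- ===== PORT B =====
-- _classify: judge an already-normalized, '='-free key (non-recursive)
def pvClassify (key : List Char) : Bool :=
  if key ∈ pvIconKeys then false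
  else if (["/", "\\", ".png", ".tga", "textures", "http://", "https://"].map String.toList).any
      (fun t => PySem.Chars.isIn t key) then false
  else if ([" ", "\t", "{", "}", "[", "]"].map String.toList).any
      (fun t => PySem.Chars.isIn t key) then false
  else if PySem.Chars.isIn ['.'] key || PySem.Chars.isIn [':'] key ||
      PySem.Chars.isIn ['*'] key then true
  else (["perm", "permission", "rank", "group", "lp_", "luckperms"].map String.toList).any
      (fun p => PySem.Chars.startswith key p)

def looks_like_permission_key_py_alt (value : String) : Bool :=
  let key := pvNorm value.toList
  if key = [] then false
  else if PySem.Chars.isIn ['='] key && !PySem.Chars.startswith key "http".toList then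
    if (PySem.Chars.splitOn key ['=']).any (fun raw =>
        let part := PySem.Chars.strip raw
        if part = [] then false
        else
          let sub := pvNorm part
          !sub.isEmpty && pvClassify sub) then true
    else pvClassify key
  else pvClassify key

-- ===== PRECONDITION & SPEC =====
def Spec_looks_like_permission_key_py (value : String) (out : Bool) : Prop := out = looks_like_permission_key_py_alt value
instance (value : String) (out : Bool) : Decidable (Spec_looks_like_permission_key_py value out) := by unfold Spec_looks_like_permission_key_py; infer_instance

-- ===== CLAIM (what is proved, stated in full; the proofs are below) =====
def Claim_equal_looks_like_permission_key_py : Prop := ∀ (value : String), Dom_looks_like_permission_key_py value → Spec_looks_like_permission_key_py value (looks_like_permission_key_py value)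

-- ===== LEMMAS AND PROOFS =====

theorem pv_stripChars_sublist (l cs : List Char) : (PySem.Chars.stripChars l cs).Sublist l := by
  unfold PySem.Chars.stripChars
  exact pv_dropdrop _ _ _

theorem pv_lowerChar_eq {d : Char} (h : PySem.Chars.lowerChar d = '=') : d = '=' := by
  unfold PySem.Chars.lowerChar PySem.Chars.isupper at h
  split_ifs at h with hu
  · exfalso
    simp only [Bool.and_eq_true, decide_eq_true_eq] at hu
    have h1 : 65 ≤ d.toNat := hu.1
    have h2 : d.toNat ≤ 90 := hu.2
    have h3 := congrArg Char.toNat h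
    rw [Char.toNat_ofNat, if_pos (Or.inl (by omega))] at h3
    have h4 : ('=' : Char).toNat = 61 := rfl
    omega
  · exact h

theorem pv_mem_stripSigns {c : Char} (key : List Char) (h : c ∈ pvStripSigns key) : c ∈ key := by
  induction hn : key.length using Nat.strong_induction_on generalizing key with
  | _ n ih =>
    rw [pvStripSigns] at h
    split at h
    · rename_i hcond
      simp only [Bool.and_eq_true, decide_eq_true_eq] at hcond
      have hlt : (PySem.Chars.strip (PySem.List.slice key (some 1) none)).length < key.length := by
        rw [PySem.List.slice_from_one]
        have h1 := (pv_strip_sublist key.tail).length_le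
        have h2 := List.length_tail (l := key)
        omega
      subst hn
      have h3 := ih _ hlt _ h rfl
      exact PySem.List.mem_of_mem_slice _ _ _ ((pv_strip_sublist _).subset h3)
    · exact h

theorem pv_mem_wrapLoop {c : Char} (ws : List (List Char)) (key : List Char)
    (h : c ∈ pvWrapLoop ws key) : c ∈ key := by
  induction ws with
  | nil => exact h
  | cons w ws ih =>
    rw [pvWrapLoop] at h
    split at h
    · exact PySem.List.mem_of_mem_slice _ _ _
        ((pv_strip_sublist _).subset ((pv_stripChars_sublist _ _).subset h))
    · exact ih h

theorem pv_mem_prefLoop {c : Char} (ps : List (List Char)) (key : List Char)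
    (h : c ∈ pvPrefLoop ps key) : c ∈ key := by
  induction ps generalizing key with
  | nil => exact h
  | cons p ps ih =>
    rw [pvPrefLoop] at h
    have h2 := ih _ h
    split at h2
    · exact PySem.List.mem_of_mem_slice _ _ _ ((pv_strip_sublist _).subset h2)
    · exact h2

theorem pv_mem_norm {c : Char} {v : List Char} (h : c ∈ pvNorm v) :
    ∃ d ∈ v, PySem.Chars.lowerChar d = c := by
  rw [pvNorm] at h
  split at h
  · exact absurd h (by simp)
  · have h1 : c ∈ PySem.Chars.lower (PySem.Chars.strip v) :=
      (pv_stripChars_sublist _ _).subset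
        (pv_mem_stripSigns _ (pv_mem_wrapLoop _ _ (pv_mem_prefLoop _ _ h)))
    rw [PySem.Chars.lower, List.mem_map] at h1
    obtain ⟨d, hd, hld⟩ := h1
    exact ⟨d, (pv_strip_sublist v).subset hd, hld⟩

theorem pv_no_eq_norm {v : List Char} (hv : '=' ∉ v) : '=' ∉ pvNorm v := by
  intro h
  obtain ⟨d, hd, hld⟩ := pv_mem_norm h
  exact hv (pv_lowerChar_eq hld ▸ hd)

theorem pv_isIn_single_false {c : Char} {l : List Char} (h : c ∉ l) :
    PySem.Chars.isIn [c] l = false := by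
  rw [PySem.Chars.isIn_eq_false_iff]
  intro hinf
  exact h (hinf.subset (List.mem_singleton_self c))

theorem pv_splitOn_go_no_sep (c : Char) :
    ∀ (fuel : Nat) (l cur : List Char) (acc : List (List Char)),
      l.length < fuel → c ∉ cur → (∀ p ∈ acc, c ∉ p) →
      ∀ p ∈ PySem.Chars.splitOn.go [c] fuel l cur acc, c ∉ p := by
  intro fuel
  induction fuel with
  | zero => intro l cur acc hlen; omega
  | succ n ih =>
    intro l cur acc hlen hcur hacc p hp
    match l with
    | [] =>
      have he : PySem.Chars.splitOn.go [c] (n + 1) [] cur acc = (cur.reverse :: acc).reverse := rfl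
      rw [he, List.mem_reverse, List.mem_cons] at hp
      rcases hp with hp | hp
      · subst hp; simpa using hcur
      · exact hacc p hp
    | ch :: rest =>
      have he : PySem.Chars.splitOn.go [c] (n + 1) (ch :: rest) cur acc =
          if [c].isPrefixOf (ch :: rest) then
            PySem.Chars.splitOn.go [c] n (List.drop [c].length (ch :: rest)) [] (cur.reverse :: acc)
          else PySem.Chars.splitOn.go [c] n rest (ch :: cur) acc := rfl
      rw [he] at hp
      split at hp
      · refine ih _ _ _ (by simp at hlen ⊢; omega) (by simp) ?_ p hp
        intro q hq
        rcases List.mem_cons.1 hq with hq | hq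
        · subst hq; simpa using hcur
        · exact hacc q hq
      · rename_i hpre
        have hch : ch ≠ c := by
          intro hh; subst hh
          exact hpre (by simp [List.isPrefixOf])
        refine ih _ _ _ (by simp at hlen ⊢; omega) ?_ hacc p hp
        intro hq
        rcases List.mem_cons.1 hq with hq | hq
        · exact hch hq.symm
        · exact hcur hq

theorem pv_splitOn_no_sep (c : Char) (s : List Char) :
    ∀ p ∈ PySem.Chars.splitOn s [c], c ∉ p := by
  unfold PySem.Chars.splitOn
  exact pv_splitOn_go_no_sep c (s.length + 1) s [] [] (by omega) (by simp) (by simp)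

theorem pv_any_congr_mem {α : Type} {l : List α} {f g : α → Bool}
    (h : ∀ a ∈ l, f a = g a) : l.any f = l.any g := by
  induction l with
  | nil => rfl
  | cons a t ih =>
    simp only [List.any_cons, h a (by simp), ih (fun b hb => h b (by simp [hb]))]

-- one recursive call of A on an '='-free string equals B's flat per-part expression
theorem pv_part_eval {q : List Char} (hq : '=' ∉ q) (n : Nat) :
    pvLooksRec (n + 1) q = (!(pvNorm q).isEmpty && pvClassify (pvNorm q)) := by
  rw [pvLooksRec]
  by_cases hk : pvNorm q = []
  · simp [hk]
  · have hfalse : PySem.Chars.isIn ['='] (pvNorm q) = false :=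
      pv_isIn_single_false (pv_no_eq_norm hq)
    simp only [hk, hfalse, Bool.false_and, if_neg (Bool.false_ne_true)]
    rw [pvClassify]
    simp [hk]

-- ===== VERDICT (by name: the statement is the Claim_ definition above) =====
theorem looks_like_permission_key_py_spec : Claim_equal_looks_like_permission_key_py := by
  unfold Claim_equal_looks_like_permission_key_py
  intro value _
  unfold Spec_looks_like_permission_key_py
  unfold looks_like_permission_key_py looks_like_permission_key_py_alt
  cases hv : value.toList with
  | nil => decide
  | cons a as =>
    rw [pvLooksRec]
    by_cases hk : pvNorm (a :: as) = []
    · simp [hk]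
    · simp only [if_neg hk]
      by_cases hc : (PySem.Chars.isIn ['='] (pvNorm (a :: as)) &&
          !PySem.Chars.startswith (pvNorm (a :: as)) "http".toList) = true
      · simp only [hc, if_true]
        have hany :
            ((((PySem.Chars.splitOn (pvNorm (a :: as)) ['=']).map PySem.Chars.strip).filter
              (fun p => !p.isEmpty)).any (fun part => pvLooksRec (a :: as).length part))
            = (PySem.Chars.splitOn (pvNorm (a :: as)) ['=']).any (fun raw =>
                if PySem.Chars.strip raw = [] then false
                else !(pvNorm (PySem.Chars.strip raw)).isEmpty &&
                  pvClassify (pvNorm (PySem.Chars.strip raw))) := by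
          rw [List.any_filter, List.any_map]
          refine pv_any_congr_mem ?_
          intro raw hraw
          have hne : '=' ∉ PySem.Chars.strip raw :=
            fun hmem => pv_splitOn_no_sep '=' _ raw hraw ((pv_strip_sublist raw).subset hmem)
          by_cases hp : PySem.Chars.strip raw = []
          · simp [Function.comp, hp]
          · simp only [Function.comp, if_neg hp, List.isEmpty_eq_false_iff.2 hp, Bool.not_false,
              Bool.true_and]
            have hlen : (a :: as).length = as.length + 1 := rfl
            rw [hlen]
            exact pv_part_eval hne as.length
        rw [hany]
        congr 1
      · simp only [Bool.not_eq_true] at hc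
        simp only [hc, if_neg Bool.false_ne_true]
        rw [pvClassify]
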